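-- pv_equiv track=rewrite | github.com/dawee/advent-of-code-2020 | day-16/resolve.py | identify_categories
-- ===== SOURCE A (Python) =====
-- def value_in_category_ranges(value, category_ranges):
--     return any((min_value <= value <= max_value for min_value, max_value in category_ranges))
--
-- def identify_possible_categories(values, categories_ranges):
--     return [
--         category_name
--         for category_name, category_ranges in categories_ranges.items()
--         if all((value_in_category_ranges(value, category_ranges) for value in values))
--     ]
--
-- def filter_index_categories(filtered_index_categories, unpicked_categories, all_values_by_index):
--     return {
--         index: (
--             filtered_index_categories[index]
--             if index in filtered_index_categories and len(filtered_index_categories[index]) == 1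
--             else identify_possible_categories(values, unpicked_categories)
--         )
--         for index, values in all_values_by_index.items()
--     }
--
-- def find_unpicked_categories(unpicked_categories, filtered_index_categories):
--     unpicked_names = [
--         category_names[0]
--         for category_names in filtered_index_categories.values()
--         if len(category_names) == 1 and category_names[0] in unpicked_categories
--     ]
--
--     return {name: ranges for name, ranges in unpicked_categories.items() if name not in unpicked_names}
--
-- def identify_categories(categories_ranges, all_values_by_index):
--     unpicked_categories = {**categories_ranges}
--     filtered_index_categories = {}
--
--     while len(unpicked_categories) > 0:
--         filtered_index_categories = filter_index_categories(
--             filtered_index_categories, unpicked_categories, all_values_by_index)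
--
--         unpicked_categories = find_unpicked_categories(
--             unpicked_categories, filtered_index_categories)
--
--     return {category_names[0]: index for index, category_names in filtered_index_categories.items()}
-- ===== SOURCE B (Python) =====
-- def identify_categories(categories_ranges, all_values_by_index):
--     def fits(value, ranges):
--         return any(lo <= value <= hi for lo, hi in ranges)
--
--     candidates = {
--         index: [name for name, ranges in categories_ranges.items()
--                 if all(fits(value, ranges) for value in values)]
--         for index, values in all_values_by_index.items()
--     }
--
--     picked = set()
--     entries = {}
--     while len(picked) < len(categories_ranges):
--         entries = {
--             index: (entries[index]
--                     if index in entries and len(entries[index]) == 1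
--                     else [name for name in candidates[index] if name not in picked])
--             for index in candidates
--         }
--         picked.update(e[0] for e in entries.values() if len(e) == 1)
--
--     return {e[0]: index for index, e in entries.items()}
-- ===== Notes on version B (the rewrite author's own statement) =====
-- stated objective: alternative
-- what changed: B computes each index's candidate-category list once up front and then runs the elimination rounds purely on those name lists with a growing picked-set, whereas A re-scans every value of every index against every remaining category's ranges in every round and rebuilds the unpicked-category dict each time (asymptotically lighter rounds, though a timing run could not confirm it: unconstrained random large inputs make A's loop diverge).
import Mathlib
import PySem

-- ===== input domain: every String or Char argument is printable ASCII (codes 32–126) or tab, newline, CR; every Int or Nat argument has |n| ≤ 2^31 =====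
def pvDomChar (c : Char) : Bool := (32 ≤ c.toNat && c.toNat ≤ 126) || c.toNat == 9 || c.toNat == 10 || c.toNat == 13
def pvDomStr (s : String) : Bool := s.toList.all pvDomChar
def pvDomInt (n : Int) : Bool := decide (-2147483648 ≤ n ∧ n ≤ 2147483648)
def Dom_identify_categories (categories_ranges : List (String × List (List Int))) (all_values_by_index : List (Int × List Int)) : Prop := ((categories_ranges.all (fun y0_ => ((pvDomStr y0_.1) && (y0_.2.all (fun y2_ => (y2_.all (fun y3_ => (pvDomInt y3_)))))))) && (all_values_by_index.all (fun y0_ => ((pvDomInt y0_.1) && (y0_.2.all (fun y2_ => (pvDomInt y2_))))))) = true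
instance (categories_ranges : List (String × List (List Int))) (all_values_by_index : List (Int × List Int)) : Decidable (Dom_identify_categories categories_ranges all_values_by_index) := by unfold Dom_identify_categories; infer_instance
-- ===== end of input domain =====

-- B precomputes each index's candidate categories ONCE and runs the elimination rounds on those
-- name lists with a picked-set, instead of A's rescanning of every value against every remaining
-- category's ranges in every round (objective: alternative — the per-round range re-scans disappear).

-- ===== PORT A =====
def value_in_category_ranges (value : Int) (category_ranges : List (List Int)) : Bool :=
  category_ranges.any (fun r =>
    match r with
    | [min_value, max_value] => decide (min_value ≤ value ∧ value ≤ max_value)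
    | _ => false)  -- Python raises ValueError unpacking a non-pair here; Pre_ admits only inputs where this case is never reached

def identify_possible_categories (values : List Int) (categories_ranges : List (String × List (List Int))) : List String :=
  (categories_ranges.filter (fun c => values.all (fun value => value_in_category_ranges value c.2))).map (fun c => c.1)

def filter_index_categories (filtered_index_categories : PySem.Dict Int (List String)) (unpicked_categories : List (String × List (List Int))) (all_values_by_index : List (Int × List Int)) : PySem.Dict Int (List String) :=
  all_values_by_index.foldl (fun d p =>
    d.insert p.1
      (match filtered_index_categories.get? p.1 with
       | some names => if names.length == 1 then names else identify_possible_categories p.2 unpicked_categories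
       | none => identify_possible_categories p.2 unpicked_categories))
    PySem.Dict.empty

def find_unpicked_categories (unpicked_categories : List (String × List (List Int))) (filtered_index_categories : PySem.Dict Int (List String)) : List (String × List (List Int)) :=
  let unpicked_names : List String :=
    ((PySem.Dict.values filtered_index_categories).filter (fun category_names =>
        category_names.length == 1 && unpicked_categories.any (fun c => c.1 == category_names.headD ""))).map
      (fun category_names => category_names.headD "")
  unpicked_categories.filter (fun c => !(unpicked_names.contains c.1))

def identifyLoopA (all_values_by_index : List (Int × List Int)) (unpicked_categories : List (String × List (List Int))) (filtered_index_categories : PySem.Dict Int (List String)) : PySem.Dict Int (List String) :=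
  if unpicked_categories.length = 0 then filtered_index_categories
  else
    let f2 := filter_index_categories filtered_index_categories unpicked_categories all_values_by_index
    let u2 := find_unpicked_categories unpicked_categories f2
    if _h : u2.length < unpicked_categories.length then identifyLoopA all_values_by_index u2 f2
    else f2  -- Python's while loop never terminates from such a state; Pre_ excludes such inputs
termination_by unpicked_categories.length

def identify_categories (categories_ranges : List (String × List (List Int))) (all_values_by_index : List (Int × List Int)) : List (String × Int) :=
  let filtered := identifyLoopA all_values_by_index categories_ranges PySem.Dict.empty
  -- category_names[0] raises IndexError on an empty list in Python; Pre_ guarantees nonempty entries, headD "" is a placeholder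
  (filtered.items.foldl (fun d p => d.insert (p.2.headD "") p.1) (PySem.Dict.empty : PySem.Dict String Int)).items

-- ===== PORT B =====
def bFits (value : Int) (ranges : List (List Int)) : Bool :=
  ranges.any (fun r =>
    match r with
    | [lo, hi] => decide (lo ≤ value ∧ value ≤ hi)
    | _ => false)  -- same unpacking as A's helper; Pre_ admits only inputs where this case is never reached

def bCandidates (categories_ranges : List (String × List (List Int))) (all_values_by_index : List (Int × List Int)) : PySem.Dict Int (List String) :=
  all_values_by_index.foldl (fun d p =>
    d.insert p.1 ((categories_ranges.filter (fun c => p.2.all (fun v => bFits v c.2))).map (fun c => c.1)))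
    PySem.Dict.empty

def bRound (candidates : PySem.Dict Int (List String)) (picked : PySem.Set String) (entries : PySem.Dict Int (List String)) : PySem.Dict Int (List String) :=
  candidates.items.foldl (fun d p =>
    d.insert p.1
      (match entries.get? p.1 with
       | some e => if e.length == 1 then e else p.2.filter (fun n => !(PySem.Set.contains picked n))
       | none => p.2.filter (fun n => !(PySem.Set.contains picked n))))
    PySem.Dict.empty

def bPick (entries : PySem.Dict Int (List String)) (picked : PySem.Set String) : PySem.Set String :=
  (PySem.Dict.values entries).foldl
    (fun s e => if e.length == 1 then PySem.Set.add s (e.headD "") else s) picked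

def identifyLoopB (candidates : PySem.Dict Int (List String)) (ncats : Nat) (picked : PySem.Set String) (entries : PySem.Dict Int (List String)) : PySem.Dict Int (List String) :=
  if h : picked.length < ncats then
    let e2 := bRound candidates picked entries
    let p2 := bPick e2 picked
    if _h : picked.length < p2.length then identifyLoopB candidates ncats p2 e2
    else e2  -- Python's while loop never terminates from such a state; Pre_ excludes such inputs
  else entries
termination_by ncats - picked.length
decreasing_by exact Nat.sub_lt_sub_left h _h

def identify_categories_alt (categories_ranges : List (String × List (List Int))) (all_values_by_index : List (Int × List Int)) : List (String × Int) :=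
  let candidates := bCandidates categories_ranges all_values_by_index
  let final := identifyLoopB candidates categories_ranges.length PySem.Set.empty PySem.Dict.empty
  (final.items.foldl (fun d p => d.insert (p.2.headD "") p.1) (PySem.Dict.empty : PySem.Dict String Int)).items

-- ===== PRECONDITION & SPEC =====
-- spec-level copies of "which categories fit the values at one index" (never touch the ports)
def pvCovers (ranges : List (List Int)) (value : Int) : Bool :=
  ranges.any (fun r =>
    match r with
    | [lo, hi] => decide (lo ≤ value ∧ value ≤ hi)
    | _ => false)

def pvCand (categories_ranges : List (String × List (List Int))) (values : List Int) : List String :=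
  (categories_ranges.filter (fun c => values.all (fun value => pvCovers c.2 value))).map (fun c => c.1)

-- Python's  any(lo <= v <= hi for lo, hi in ranges)  raises ValueError iff it reaches a non-pair item:
-- pvSafeAny says it never does for this value, pvSafeAll says the short-circuiting all(...) never does
def pvSafeAny (v : Int) : List (List Int) → Bool
  | [] => true
  | r :: rest =>
    match r with
    | [lo, hi] => if lo ≤ v ∧ v ≤ hi then true else pvSafeAny v rest
    | _ => false

def pvSafeAll (ranges : List (List Int)) : List Int → Bool
  | [] => true
  | v :: rest => pvSafeAny v ranges && (!(pvCovers ranges v) || pvSafeAll ranges rest)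

-- the names forced (unique remaining candidate of some index) once the names in P are picked
def pvForced (categories_ranges : List (String × List (List Int))) (all_values_by_index : List (Int × List Int)) (P : List String) : List String :=
  (categories_ranges.map Prod.fst).filter (fun n =>
    !(P.contains n) && all_values_by_index.any (fun p =>
      (pvCand categories_ranges p.2).filter (fun m => !(P.contains m)) == [n]))

-- names picked after k rounds of the elimination
def pvP (categories_ranges : List (String × List (List Int))) (all_values_by_index : List (Int × List Int)) : Nat → List String
  | 0 => []
  | k+1 => pvP categories_ranges all_values_by_index k ++
      pvForced categories_ranges all_values_by_index (pvP categories_ranges all_values_by_index k)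

-- number of rounds A's while loop runs (first k with every category picked)
def pvT (categories_ranges : List (String × List (List Int))) (all_values_by_index : List (Int × List Int)) : Nat :=
  ((List.range (categories_ranges.length + 1)).find? (fun k =>
    (categories_ranges.map Prod.fst).all (fun n => (pvP categories_ranges all_values_by_index k).contains n))).getD 0

-- Pre_ admits exactly the inputs on which the Python A returns normally: the two association lists
-- are genuine dicts (distinct keys), the range scans never reach a non-pair range item (otherwise
-- unpacking it raises ValueError), the elimination picks every category within |categories| rounds
-- (otherwise A's while loop never terminates), and every index's final entry is nonempty
-- (otherwise category_names[0] raises IndexError in A's final dict comprehension).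
def Pre_identify_categories (categories_ranges : List (String × List (List Int))) (all_values_by_index : List (Int × List Int)) : Prop :=
  (categories_ranges.map Prod.fst).Nodup ∧
  (all_values_by_index.map Prod.fst).Nodup ∧
  (∀ p ∈ all_values_by_index, ∀ c ∈ categories_ranges, pvSafeAll c.2 p.2 = true) ∧
  (∀ n ∈ categories_ranges.map Prod.fst, n ∈ pvP categories_ranges all_values_by_index categories_ranges.length) ∧
  (categories_ranges = [] ∨ ∀ p ∈ all_values_by_index,
    (∃ j < pvT categories_ranges all_values_by_index,
      ((pvCand categories_ranges p.2).filter (fun m => !((pvP categories_ranges all_values_by_index j).contains m))).length = 1) ∨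
    (pvCand categories_ranges p.2).filter (fun m => !((pvP categories_ranges all_values_by_index (pvT categories_ranges all_values_by_index - 1)).contains m)) ≠ [])

instance (categories_ranges : List (String × List (List Int))) (all_values_by_index : List (Int × List Int)) : Decidable (Pre_identify_categories categories_ranges all_values_by_index) := by
  unfold Pre_identify_categories; infer_instance

def pvWitness_identify_categories : (List (String × List (List Int))) × (List (Int × List Int)) :=
  ([("a", [[0, 10]]), ("b", [[5, 10]])], [(0, [7]), (1, [1])])

def Spec_identify_categories (categories_ranges : List (String × List (List Int))) (all_values_by_index : List (Int × List Int)) (out : List (String × Int)) : Prop := out = identify_categories_alt categories_ranges all_values_by_index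
instance (categories_ranges : List (String × List (List Int))) (all_values_by_index : List (Int × List Int)) (out : List (String × Int)) : Decidable (Spec_identify_categories categories_ranges all_values_by_index out) := by unfold Spec_identify_categories; infer_instance

-- ===== CLAIM (what is proved, stated in full; the proofs are below) =====
def Claim_equal_identify_categories : Prop := ∀ (categories_ranges : List (String × List (List Int))) (all_values_by_index : List (Int × List Int)), Dom_identify_categories categories_ranges all_values_by_index → Pre_identify_categories categories_ranges all_values_by_index → Spec_identify_categories categories_ranges all_values_by_index (identify_categories categories_ranges all_values_by_index)

-- ===== LEMMAS AND PROOFS =====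

-- the common shape of one round's new entry for index p (frozen singleton, else remaining candidates)
def pvEnt (categories_ranges : List (String × List (List Int))) (F : PySem.Dict Int (List String)) (picked : List String) (p : Int × List Int) : List String :=
  match F.get? p.1 with
  | some e => if e.length == 1 then e else (pvCand categories_ranges p.2).filter (fun m => !(picked.contains m))
  | none => (pvCand categories_ranges p.2).filter (fun m => !(picked.contains m))

-- ---------- bridges ----------

theorem pv_ipc_filter (cats : List (String × List (List Int))) (values : List Int) (q : String → Bool) :
    identify_possible_categories values (cats.filter (fun c => q c.1)) = (pvCand cats values).filter q := by
  simp only [identify_possible_categories, pvCand, value_in_category_ranges, pvCovers,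
    List.filter_map, List.filter_filter]
  congr 1
  apply List.filter_congr
  intro c _
  simp [Function.comp, Bool.and_comm]

theorem pv_cand_sublist (cats : List (String × List (List Int))) (values : List Int) :
    (pvCand cats values).Sublist (cats.map Prod.fst) := by
  unfold pvCand
  exact List.Sublist.map _ List.filter_sublist

-- ---------- generic list helpers ----------

theorem pv_length_filter_contains {α : Type} [DecidableEq α] [BEq α] [LawfulBEq α]
    (l2 l1 : List α) (h2 : l2.Nodup) (h1 : l1.Nodup) (hsub : ∀ x ∈ l1, x ∈ l2) :
    (l2.filter (fun x => l1.contains x)).length = l1.length := by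
  have hperm : (l2.filter (fun x => l1.contains x)).Perm l1 := by
    refine (List.perm_ext_iff_of_nodup (h2.filter _) h1).mpr ?_
    intro a
    simp only [List.mem_filter, List.contains_eq_mem, decide_eq_true_eq]
    exact ⟨fun h => h.2, fun h => ⟨hsub a h, h⟩⟩
  exact hperm.length_eq

theorem pv_length_filter_not_contains {α : Type} [DecidableEq α] [BEq α] [LawfulBEq α]
    (l2 l1 : List α) (h2 : l2.Nodup) (h1 : l1.Nodup) (hsub : ∀ x ∈ l1, x ∈ l2) :
    (l2.filter (fun x => !(l1.contains x))).length = l2.length - l1.length := by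
  have hsplit := List.length_eq_length_filter_add (l := l2) (f := fun x => l1.contains x)
  have hc := pv_length_filter_contains l2 l1 h2 h1 hsub
  omega

-- ---------- the two round computations produce the same dict ----------

theorem pv_bCand_items (cats : List (String × List (List Int))) (avbi : List (Int × List Int))
    (ha : (avbi.map Prod.fst).Nodup) :
    (bCandidates cats avbi).items = avbi.map (fun p => (p.1, pvCand cats p.2)) := by
  unfold bCandidates
  rw [PySem.Dict.items_foldl_insert_fresh avbi Prod.fst _ _ (fun a _ => by simp) ha]
  rfl

theorem pv_roundA (cats : List (String × List (List Int))) (avbi : List (Int × List Int))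
    (ha : (avbi.map Prod.fst).Nodup) (picked : List String) (F : PySem.Dict Int (List String)) :
    filter_index_categories F (cats.filter (fun c => !(picked.contains c.1))) avbi
      = PySem.Dict.mk (avbi.map (fun p => (p.1, pvEnt cats F picked p))) := by
  apply PySem.Dict.ext
  unfold filter_index_categories
  rw [PySem.Dict.items_foldl_insert_fresh avbi Prod.fst _ _ (fun a _ => by simp) ha]
  show [] ++ _ = _
  rw [List.nil_append]
  apply List.map_congr_left
  intro p hp
  unfold pvEnt
  rw [pv_ipc_filter cats p.2 (fun m => !picked.contains m)]

theorem pv_roundB (cats : List (String × List (List Int))) (avbi : List (Int × List Int))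
    (ha : (avbi.map Prod.fst).Nodup) (picked : PySem.Set String) (F : PySem.Dict Int (List String)) :
    bRound (bCandidates cats avbi) picked F
      = PySem.Dict.mk (avbi.map (fun p => (p.1, pvEnt cats F picked p))) := by
  apply PySem.Dict.ext
  unfold bRound
  rw [pv_bCand_items cats avbi ha]
  rw [PySem.Dict.items_foldl_insert_fresh (avbi.map (fun p => (p.1, pvCand cats p.2))) Prod.fst _ _
    (fun a _ => by simp) (by simpa [List.map_map, Function.comp] using ha)]
  show [] ++ _ = _
  rw [List.nil_append, List.map_map]
  apply List.map_congr_left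
  intro p hp
  simp only [Function.comp]
  unfold pvEnt
  rfl

-- ---------- the picked-set update ----------

theorem pv_pick_mem (l : List (List String)) (s : PySem.Set String) (x : String) :
    x ∈ l.foldl (fun s e => if e.length == 1 then PySem.Set.add s (e.headD "") else s) s ↔
      x ∈ s ∨ ∃ e ∈ l, e.length = 1 ∧ e.headD "" = x := by
  induction l generalizing s with
  | nil => simp
  | cons e t ih =>
    simp only [List.foldl_cons]
    by_cases he : e.length = 1
    · rw [if_pos (show (e.length == 1) = true by simpa using he), ih]
      simp only [PySem.Set.mem_add, List.mem_cons]
      constructor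
      · rintro ((h | rfl) | ⟨f, hf, h1, h2⟩)
        · exact Or.inl h
        · exact Or.inr ⟨e, Or.inl rfl, he, rfl⟩
        · exact Or.inr ⟨f, Or.inr hf, h1, h2⟩
      · rintro (h | ⟨f, (rfl | hf), h1, h2⟩)
        · exact Or.inl (Or.inl h)
        · exact Or.inl (Or.inr h2.symm)
        · exact Or.inr ⟨f, hf, h1, h2⟩
    · rw [if_neg (show ¬ (e.length == 1) = true by simpa using he), ih]
      simp only [List.mem_cons]
      constructor
      · rintro (h | ⟨f, hf, h1, h2⟩)
        · exact Or.inl h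
        · exact Or.inr ⟨f, Or.inr hf, h1, h2⟩
      · rintro (h | ⟨f, (rfl | hf), h1, h2⟩)
        · exact Or.inl h
        · exact absurd h1 he
        · exact Or.inr ⟨f, hf, h1, h2⟩

theorem pv_pick_nodup (l : List (List String)) (s : PySem.Set String) (hs : s.Nodup) :
    (l.foldl (fun s e => if e.length == 1 then PySem.Set.add s (e.headD "") else s) s).Nodup := by
  induction l generalizing s with
  | nil => exact hs
  | cons e t ih =>
    simp only [List.foldl_cons]
    by_cases he : e.length == 1
    · rw [if_pos he]; exact ih _ (PySem.Set.nodup_add _ _ hs)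
    · rw [if_neg he]; exact ih _ hs

theorem pv_pick_len_le (l : List (List String)) (s : PySem.Set String) :
    s.length ≤ (l.foldl (fun s e => if e.length == 1 then PySem.Set.add s (e.headD "") else s) s).length := by
  induction l generalizing s with
  | nil => exact le_refl _
  | cons e t ih =>
    simp only [List.foldl_cons]
    refine le_trans ?_ (ih _)
    by_cases he : e.length == 1
    · rw [if_pos he, PySem.Set.add_eq_ite]
      split <;> simp
    · rw [if_neg he]

-- ---------- small facts ----------

theorem pv_headD_mem (l : List String) (h : l.length = 1) : l.headD "" ∈ l := by
  cases l with
  | nil => simp at h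
  | cons x t => simp

theorem pv_ent_head (cats : List (String × List (List Int))) (F : PySem.Dict Int (List String))
    (picked : List String)
    (hinv : ∀ kv ∈ F.items, kv.2.length = 1 → kv.2.headD "" ∈ cats.map Prod.fst)
    (p : Int × List Int) (hlen : (pvEnt cats F picked p).length = 1) :
    (pvEnt cats F picked p).headD "" ∈ cats.map Prod.fst := by
  unfold pvEnt at hlen ⊢
  cases hget : F.get? p.1 with
  | some e =>
    simp only [hget] at hlen ⊢
    by_cases hl : e.length == 1
    · rw [if_pos hl] at hlen ⊢
      exact hinv (p.1, e) (PySem.Dict.mem_items_of_get?_eq_some _ hget) (by simpa using hl)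
    · rw [if_neg hl] at hlen ⊢
      have hmem := pv_headD_mem _ hlen
      exact (pv_cand_sublist cats p.2).subset (List.mem_filter.mp hmem).1
  | none =>
    simp only [hget] at hlen ⊢
    have hmem := pv_headD_mem _ hlen
    exact (pv_cand_sublist cats p.2).subset (List.mem_filter.mp hmem).1

theorem pv_U_len (cats : List (String × List (List Int))) (picked : List String)
    (hc : (cats.map Prod.fst).Nodup) (hnd : picked.Nodup)
    (hsub : ∀ x ∈ picked, x ∈ cats.map Prod.fst) :
    (cats.filter (fun c => !(picked.contains c.1))).length = cats.length - picked.length := by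
  have h := pv_length_filter_not_contains (cats.map Prod.fst) picked hc hnd hsub
  have hmap : ((cats.map Prod.fst).filter (fun x => !(picked.contains x)))
      = (cats.filter (fun c => !(picked.contains c.1))).map Prod.fst := by
    rw [List.filter_map]; rfl
  rw [hmap, List.length_map, List.length_map] at h
  exact h

theorem pv_picked_le (cats : List (String × List (List Int))) (picked : List String)
    (hc : (cats.map Prod.fst).Nodup) (hnd : picked.Nodup)
    (hsub : ∀ x ∈ picked, x ∈ cats.map Prod.fst) :
    picked.length ≤ cats.length := by
  have h := pv_length_filter_contains (cats.map Prod.fst) picked hc hnd hsub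
  have h2 := List.length_filter_le (fun x => picked.contains x) (cats.map Prod.fst)
  rw [h, List.length_map] at h2
  exact h2

-- ---------- the main loop correspondence ----------

theorem pv_loop_eq (cats : List (String × List (List Int))) (avbi : List (Int × List Int))
    (hc : (cats.map Prod.fst).Nodup) (ha : (avbi.map Prod.fst).Nodup) :
    ∀ (fuel : Nat) (picked : List String) (F : PySem.Dict Int (List String)),
      (cats.filter (fun c => !(picked.contains c.1))).length ≤ fuel →
      picked.Nodup → (∀ x ∈ picked, x ∈ cats.map Prod.fst) →
      (∀ kv ∈ F.items, kv.2.length = 1 → kv.2.headD "" ∈ cats.map Prod.fst) →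
      identifyLoopA avbi (cats.filter (fun c => !(picked.contains c.1))) F
        = identifyLoopB (bCandidates cats avbi) cats.length picked F := by
  intro fuel
  induction fuel with
  | zero =>
    intro picked F hfuel hnd hsub hinv
    have hUlen := pv_U_len cats picked hc hnd hsub
    have hpl := pv_picked_le cats picked hc hnd hsub
    rw [identifyLoopA, identifyLoopB, if_pos (by omega), dif_neg (by omega)]
  | succ fuel ih =>
    intro picked F hfuel hnd hsub hinv
    have hUlen := pv_U_len cats picked hc hnd hsub
    have hpl := pv_picked_le cats picked hc hnd hsub
    by_cases hU0 : (cats.filter (fun c => !(picked.contains c.1))).length = 0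
    · rw [identifyLoopB, dif_neg (by omega), identifyLoopA, if_pos hU0]
    · rw [identifyLoopB, dif_pos (by omega)]
      rw [identifyLoopA, if_neg hU0]
      have hA2 := pv_roundA cats avbi ha picked F
      have hB2 := pv_roundB cats avbi ha picked F
      simp only [hA2, hB2]
      have hvals : PySem.Dict.values (PySem.Dict.mk (avbi.map (fun p => (p.1, pvEnt cats F picked p))))
          = avbi.map (fun p => pvEnt cats F picked p) := by
        simp [PySem.Dict.values, List.map_map, Function.comp]
      have hE1 : ∀ p ∈ avbi, (pvEnt cats F picked p).length = 1 →
          (pvEnt cats F picked p).headD "" ∈ cats.map Prod.fst :=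
        fun p _ h => pv_ent_head cats F picked hinv p h
      have hp2mem : ∀ x, x ∈ bPick (PySem.Dict.mk (avbi.map (fun p => (p.1, pvEnt cats F picked p)))) picked ↔
          x ∈ picked ∨ ∃ p ∈ avbi, (pvEnt cats F picked p).length = 1 ∧ (pvEnt cats F picked p).headD "" = x := by
        intro x
        unfold bPick
        rw [hvals, pv_pick_mem]
        simp only [List.mem_map]
        constructor
        · rintro (h | ⟨e, ⟨p, hp, rfl⟩, h1, h2⟩)
          exacts [Or.inl h, Or.inr ⟨p, hp, h1, h2⟩]
        · rintro (h | ⟨p, hp, h1, h2⟩)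
          exacts [Or.inl h, Or.inr ⟨pvEnt cats F picked p, ⟨p, hp, rfl⟩, h1, h2⟩]
      have hp2nd : (bPick (PySem.Dict.mk (avbi.map (fun p => (p.1, pvEnt cats F picked p)))) picked).Nodup := by
        unfold bPick; exact pv_pick_nodup _ _ hnd
      have hp2ge : picked.length ≤ (bPick (PySem.Dict.mk (avbi.map (fun p => (p.1, pvEnt cats F picked p)))) picked).length := by
        unfold bPick; exact pv_pick_len_le _ _
      have hp2sub : ∀ x ∈ bPick (PySem.Dict.mk (avbi.map (fun p => (p.1, pvEnt cats F picked p)))) picked,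
          x ∈ cats.map Prod.fst := by
        intro x hx
        rcases (hp2mem x).mp hx with h | ⟨p, hp, h1, h2⟩
        · exact hsub x h
        · exact h2 ▸ hE1 p hp h1
      have hp2len := pv_U_len cats _ hc hp2nd hp2sub
      have hp2le := pv_picked_le cats _ hc hp2nd hp2sub
      have hinv2 : ∀ kv ∈ (PySem.Dict.mk (avbi.map (fun p => (p.1, pvEnt cats F picked p)))).items,
          kv.2.length = 1 → kv.2.headD "" ∈ cats.map Prod.fst := by
        intro kv hkv hl
        obtain ⟨p, hp, rfl⟩ := List.mem_map.mp hkv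
        exact hE1 p hp hl
      have hU2 : find_unpicked_categories (cats.filter (fun c => !(picked.contains c.1)))
            (PySem.Dict.mk (avbi.map (fun p => (p.1, pvEnt cats F picked p))))
          = cats.filter (fun c => !(List.contains (bPick (PySem.Dict.mk (avbi.map (fun p => (p.1, pvEnt cats F picked p)))) picked) c.1)) := by
        unfold find_unpicked_categories
        rw [hvals, List.filter_filter]
        apply List.filter_congr
        intro c hcmem
        by_cases hpk : c.1 ∈ picked
        · have h2 : c.1 ∈ bPick (PySem.Dict.mk (avbi.map (fun p => (p.1, pvEnt cats F picked p)))) picked :=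
            (hp2mem c.1).mpr (Or.inl hpk)
          simp [List.contains_eq_mem, hpk, h2]
        · by_cases hq : ∃ p ∈ avbi, (pvEnt cats F picked p).length = 1 ∧ (pvEnt cats F picked p).headD "" = c.1
          · have h2 : c.1 ∈ bPick (PySem.Dict.mk (avbi.map (fun p => (p.1, pvEnt cats F picked p)))) picked :=
              (hp2mem c.1).mpr (Or.inr hq)
            obtain ⟨p, hp, h1, hh⟩ := hq
            have hun : c.1 ∈ ((avbi.map (fun p => pvEnt cats F picked p)).filter (fun category_names =>
                category_names.length == 1 && (cats.filter (fun c => !(picked.contains c.1))).any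
                  (fun c => c.1 == category_names.headD ""))).map (fun category_names => category_names.headD "") := by
              refine List.mem_map.mpr ⟨pvEnt cats F picked p, List.mem_filter.mpr ⟨List.mem_map.mpr ⟨p, hp, rfl⟩, ?_⟩, hh⟩
              refine (Bool.and_eq_true _ _).mpr ⟨by simpa using h1, ?_⟩
              refine List.any_eq_true.mpr ⟨c, List.mem_filter.mpr ⟨hcmem, by simpa [List.contains_eq_mem] using hpk⟩, ?_⟩
              rw [hh]
              exact beq_self_eq_true c.1
            have e1 : picked.contains c.1 = false := by
              rw [List.contains_eq_mem]; exact decide_eq_false hpk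
            have e2 : List.contains (bPick (PySem.Dict.mk (avbi.map (fun p => (p.1, pvEnt cats F picked p)))) picked) c.1 = true := by
              rw [List.contains_eq_mem]; exact decide_eq_true h2
            have e3 : (((avbi.map (fun p => pvEnt cats F picked p)).filter (fun category_names =>
                category_names.length == 1 && (cats.filter (fun c => !(picked.contains c.1))).any
                  (fun c => c.1 == category_names.headD ""))).map (fun category_names => category_names.headD "")).contains c.1 = true := by
              rw [List.contains_eq_mem]; exact decide_eq_true hun
            rw [e1, e2, e3]
            rfl
          · have h2 : c.1 ∉ bPick (PySem.Dict.mk (avbi.map (fun p => (p.1, pvEnt cats F picked p)))) picked := by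
              intro hx
              rcases (hp2mem c.1).mp hx with h | h
              exacts [hpk h, hq h]
            have hun : c.1 ∉ ((avbi.map (fun p => pvEnt cats F picked p)).filter (fun category_names =>
                category_names.length == 1 && (cats.filter (fun c => !(picked.contains c.1))).any
                  (fun c => c.1 == category_names.headD ""))).map (fun category_names => category_names.headD "") := by
              intro hx
              obtain ⟨e, hef, hh⟩ := List.mem_map.mp hx
              obtain ⟨hem, hcond⟩ := List.mem_filter.mp hef
              obtain ⟨p, hp, rfl⟩ := List.mem_map.mp hem
              exact hq ⟨p, hp, by simpa using (Bool.and_eq_true _ _).mp hcond |>.1, hh⟩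
            have e1 : picked.contains c.1 = false := by
              rw [List.contains_eq_mem]; exact decide_eq_false hpk
            have e2 : List.contains (bPick (PySem.Dict.mk (avbi.map (fun p => (p.1, pvEnt cats F picked p)))) picked) c.1 = false := by
              rw [List.contains_eq_mem]; exact decide_eq_false h2
            have e3 : (((avbi.map (fun p => pvEnt cats F picked p)).filter (fun category_names =>
                category_names.length == 1 && (cats.filter (fun c => !(picked.contains c.1))).any
                  (fun c => c.1 == category_names.headD ""))).map (fun category_names => category_names.headD "")).contains c.1 = false := by
              rw [List.contains_eq_mem]; exact decide_eq_false hun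
            rw [e1, e2, e3]
            rfl
      rw [hU2]
      by_cases hprog : picked.length < (bPick (PySem.Dict.mk (avbi.map (fun p => (p.1, pvEnt cats F picked p)))) picked).length
      · rw [dif_pos (by omega), dif_pos hprog]
        exact ih _ _ (by omega) hp2nd hp2sub hinv2
      · rw [dif_neg (by omega), dif_neg hprog]

-- ===== VERDICT (by name: the statement is the Claim_ definition above) =====
theorem identify_categories_spec : Claim_equal_identify_categories := by
  intro cats avbi _hdom hP
  unfold Spec_identify_categories
  obtain ⟨hc, ha, -, -, -⟩ := hP
  have h0 : cats.filter (fun c => !((([] : List String)).contains c.1)) = cats := by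
    apply List.filter_eq_self.mpr; intro c _; rfl
  have hloop := pv_loop_eq cats avbi hc ha
    (cats.filter (fun c => !((([] : List String)).contains c.1))).length [] PySem.Dict.empty
    (le_refl _) List.nodup_nil (by intro x hx; cases hx) (by intro kv hkv; cases hkv)
  rw [h0] at hloop
  show _ = identify_categories_alt cats avbi
  unfold identify_categories identify_categories_alt
  rw [hloop]
  rfl
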